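-- pv_equiv track=rewrite | github.com/RustyNova016/PMX-VMD-Scripting-Tools | python/_translate_to_english.py | combine_translate_requests
-- ===== SOURCE A (Python) =====
-- TRANSLATE_MAX_LINES_PER_REQUEST = 15
--
-- def combine_translate_requests(jp_list: list) -> list:
-- 	"""
-- 	Split/join a massive list of items to translate into fewer requests which each contain many separated by newlines.
-- 	options: TRANSLATE_MAX_LINES_PER_REQUEST.
-- 	"""
-- 	retme = []
-- 	start_idx = 0
-- 	while start_idx < len(jp_list):
-- 		sub_list = jp_list[start_idx:start_idx + TRANSLATE_MAX_LINES_PER_REQUEST]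
-- 		bigstr = "\n".join(sub_list)
-- 		retme.append(bigstr)
-- 		start_idx += TRANSLATE_MAX_LINES_PER_REQUEST
-- 	return retme
-- ===== SOURCE B (Python) =====
-- TRANSLATE_MAX_LINES_PER_REQUEST = 15
--
-- def combine_translate_requests(jp_list: list) -> list:
-- 	"""Same chunk-and-join result, built by a single-element traversal with a buffer."""
-- 	retme = []
-- 	buf = []
-- 	for item in jp_list:
-- 		buf.append(item)
-- 		if len(buf) == TRANSLATE_MAX_LINES_PER_REQUEST:
-- 			retme.append("\n".join(buf))
-- 			buf = []
-- 	if buf: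
-- 		retme.append("\n".join(buf))
-- 	return retme
-- ===== Notes on version B (the rewrite author's own statement) =====
-- stated objective: alternative
-- what changed: Replaces index-based slicing (jp_list[start:start+15] per iteration) with a single-element traversal that accumulates a buffer and flushes it every 15 elements and once at the end.
import Mathlib
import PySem

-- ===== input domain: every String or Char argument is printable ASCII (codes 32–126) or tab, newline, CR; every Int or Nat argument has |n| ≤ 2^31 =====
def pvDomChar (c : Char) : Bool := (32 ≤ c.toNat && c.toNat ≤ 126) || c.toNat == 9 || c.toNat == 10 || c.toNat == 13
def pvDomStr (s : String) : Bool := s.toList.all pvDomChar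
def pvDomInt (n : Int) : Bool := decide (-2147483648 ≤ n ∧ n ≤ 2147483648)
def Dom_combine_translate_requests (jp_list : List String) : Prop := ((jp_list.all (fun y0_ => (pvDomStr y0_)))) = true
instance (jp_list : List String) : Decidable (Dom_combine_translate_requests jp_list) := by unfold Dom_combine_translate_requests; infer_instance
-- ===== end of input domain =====

-- B replaces A's index-slicing loop with a buffer-accumulating single pass; same return value (alternative decomposition).
-- ===== PORT A =====
-- while start_idx < len(jp_list): append "\n".join(jp_list[start_idx:start_idx+15]); start_idx += 15
def combineLoopA (jp_list : List String) (start_idx : Nat) (retme : List String) : List String :=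
  if start_idx < jp_list.length then
    let sub_list := PySem.List.slice jp_list (some (start_idx : Int)) (some ((start_idx : Int) + 15))
    let bigstr := PySem.Str.join "\n" sub_list
    combineLoopA jp_list (start_idx + 15) (retme ++ [bigstr])
  else retme
termination_by jp_list.length - start_idx

def combine_translate_requests (jp_list : List String) : List String :=
  combineLoopA jp_list 0 []

-- ===== PORT B =====
-- for item: buf.append(item); flush when len(buf) == 15; final flush if buf nonempty
def combineLoopB (l : List String) (buf retme : List String) : List String :=
  match l with
  | [] => if buf.isEmpty then retme else retme ++ [PySem.Str.join "\n" buf]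
  | x :: xs =>
    let buf' := buf ++ [x]
    if buf'.length = 15 then combineLoopB xs [] (retme ++ [PySem.Str.join "\n" buf'])
    else combineLoopB xs buf' retme

def combine_translate_requests_alt (jp_list : List String) : List String :=
  combineLoopB jp_list [] []

-- ===== PRECONDITION & SPEC =====
def Spec_combine_translate_requests (jp_list : List String) (out : List String) : Prop := out = combine_translate_requests_alt jp_list
instance (jp_list : List String) (out : List String) : Decidable (Spec_combine_translate_requests jp_list out) := by unfold Spec_combine_translate_requests; infer_instance

-- ===== CLAIM (what is proved, stated in full; the proofs are below) =====
def Claim_equal_combine_translate_requests : Prop := ∀ (jp_list : List String), Dom_combine_translate_requests jp_list → Spec_combine_translate_requests jp_list (combine_translate_requests jp_list)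

-- ===== LEMMAS AND PROOFS =====

-- canonical chunking both ports reduce to
def chunks (l : List String) : List String :=
  if l.isEmpty then [] else PySem.Str.join "\n" (l.take 15) :: chunks (l.drop 15)
termination_by l.length
decreasing_by
  have : l.length ≠ 0 := by
    simpa [List.isEmpty_iff, List.length_eq_zero_iff] using (by assumption : ¬ l.isEmpty = true)
  simp only [List.length_drop]; omega

lemma loopA_eq_chunks (jp : List String) (start : Nat) (retme : List String) :
    combineLoopA jp start retme = retme ++ chunks (jp.drop start) := by
  fun_induction combineLoopA jp start retme with
  | case1 start retme h sub big ih =>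
    rw [ih]
    have hne : ¬ (jp.drop start).isEmpty = true := by
      simp only [List.isEmpty_iff, List.drop_eq_nil_iff]; omega
    conv_rhs => rw [chunks, if_neg hne]
    have hsub : sub = (jp.drop start).take 15 := by
      simpa using PySem.List.slice_natCast_add jp start 15
    have hdd : (jp.drop start).drop 15 = jp.drop (start + 15) := by
      rw [List.drop_drop]
    have hbig : big = PySem.Str.join "\n" ((jp.drop start).take 15) := by rw [← hsub]
    rw [hdd, hbig]
    simp
  | case2 start retme h =>
    have : jp.drop start = [] := by
      simp [List.drop_eq_nil_iff]; omega
    simp [this, chunks]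

lemma loopB_eq_chunks (l : List String) (buf retme : List String) (h : buf.length < 15) :
    combineLoopB l buf retme = retme ++ chunks (buf ++ l) := by
  induction l generalizing buf retme with
  | nil =>
    rw [combineLoopB, List.append_nil]
    by_cases hb : buf.isEmpty
    · rw [if_pos hb, chunks, if_pos hb, List.append_nil]
    · rw [if_neg hb, chunks, if_neg hb]
      have ht : buf.take 15 = buf := List.take_of_length_le (by omega)
      have hd : buf.drop 15 = [] := by rw [List.drop_eq_nil_iff]; omega
      rw [ht, hd, chunks]
      simp
  | cons x xs ih =>
    rw [combineLoopB]
    have hsplit : buf ++ x :: xs = (buf ++ [x]) ++ xs := by simp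
    by_cases h15 : (buf ++ [x]).length = 15
    · rw [if_pos h15, ih [] _ (by simp)]
      have hne : ¬ ((buf ++ [x]) ++ xs).isEmpty = true := by simp
      have ht : ((buf ++ [x]) ++ xs).take 15 = buf ++ [x] := by
        rw [List.take_append_of_le_length (by omega), List.take_of_length_le (by omega)]
      have hd : ((buf ++ [x]) ++ xs).drop 15 = xs := by
        rw [← h15, List.drop_left]
      rw [hsplit]
      conv_rhs => rw [chunks, if_neg hne, ht, hd]
      simp
    · rw [if_neg h15, ih (buf ++ [x]) retme (by simp at h15 ⊢; omega), hsplit]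

-- ===== VERDICT =====
theorem combine_translate_requests_spec : Claim_equal_combine_translate_requests := by
  intro jp _
  unfold Spec_combine_translate_requests combine_translate_requests combine_translate_requests_alt
  rw [loopB_eq_chunks _ _ _ (by simp), loopA_eq_chunks]
  simp
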